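-- pv_equiv track=rewrite | github.com/GrindelfP/pltmt-tasks | task-3.py | sort_grammar
-- ===== SOURCE A (Python) =====
-- def sort_grammar(grammar):
--     ordered = []
--     visited = set()
--
--     def add_non_terminal(non_terminal):
--         if non_terminal not in visited:
--             visited.add(non_terminal)
--             ordered.append(non_terminal)
--             for production in grammar[non_terminal]:
--                 for symbol in production:
--                     if symbol.isupper() and symbol not in visited:
--                         add_non_terminal(symbol)
--
--     add_non_terminal('S')
--     sorted_grammar = {key: grammar[key] for key in ordered}
--
--     return sorted_grammar
-- ===== SOURCE B (Python) =====
-- def sort_grammar(grammar):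
--     ordered = []
--     visited = set()
--     stack = ['S']
--     while stack:
--         node = stack.pop()
--         if node in visited:
--             continue
--         visited.add(node)
--         ordered.append(node)
--         children = [symbol for production in grammar[node]
--                     for symbol in production if symbol.isupper()]
--         stack.extend(reversed(children))
--     return {key: grammar[key] for key in ordered}
-- ===== Notes on version B (the rewrite author's own statement) =====
-- stated objective: idiomatic
-- what changed: Replaces the recursive DFS closure by an iterative explicit-stack DFS (children pushed in reverse, nodes marked on pop) yielding the same preorder discovery without recursion.
import Mathlib
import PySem

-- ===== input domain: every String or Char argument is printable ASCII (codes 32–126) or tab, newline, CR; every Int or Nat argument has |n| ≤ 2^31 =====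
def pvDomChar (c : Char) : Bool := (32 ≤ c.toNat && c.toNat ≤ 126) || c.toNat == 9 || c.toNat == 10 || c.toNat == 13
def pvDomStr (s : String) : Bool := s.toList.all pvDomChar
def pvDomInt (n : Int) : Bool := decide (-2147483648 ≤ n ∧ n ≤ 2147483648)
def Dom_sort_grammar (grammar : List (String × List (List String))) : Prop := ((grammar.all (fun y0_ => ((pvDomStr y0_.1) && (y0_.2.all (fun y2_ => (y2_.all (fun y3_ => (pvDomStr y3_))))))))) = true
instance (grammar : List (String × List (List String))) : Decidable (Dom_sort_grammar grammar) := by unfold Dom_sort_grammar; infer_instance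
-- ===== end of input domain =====

-- B replaces A's recursive DFS closure by an iterative explicit-stack DFS (children pushed
-- in reverse, nodes marked on pop), the same preorder discovery without recursion (idiomatic).

-- Python str.isupper() on the printable-ASCII domain: at least one letter and no lowercase letter
-- (ASCII cased characters are exactly the letters).
def pyStrIsupper (s : String) : Bool :=
  s.toList.any (fun c => PySem.Chars.isalpha c) && s.toList.all (fun c => !PySem.Chars.islower c)

-- ===== PORT A =====
-- Recursive DFS, transliterated. `fuel` bounds the recursion depth; `grammar.length + 1`
-- suffices because every level below the top has marked a fresh key of the dict (the
-- equivalence proof below goes through without ever reaching fuel 0).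
-- `none` = the Python KeyError (grammar[nt] with nt not a key); excluded by Pre_.
mutual
def dfsA (gd : PySem.Dict String (List (List String))) (fuel : Nat)
    (vis : PySem.Set String) (ord : List String) (nt : String) :
    Option (PySem.Set String × List String) :=
  if vis.contains nt then some (vis, ord)
  else
    match fuel with
    | 0 => none
    | f + 1 =>
      let vis' := PySem.Set.add vis nt
      let ord' := ord ++ [nt]
      match gd.get? nt with
      | none => none        -- KeyError: grammar[non_terminal]
      | some prods => dfsProds gd f vis' ord' prods
  termination_by (fuel, 0, 0)

def dfsProds (gd : PySem.Dict String (List (List String))) (fuel : Nat)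
    (vis : PySem.Set String) (ord : List String) (prods : List (List String)) :
    Option (PySem.Set String × List String) :=
  match prods with
  | [] => some (vis, ord)
  | p :: rest =>
    match dfsSyms gd fuel vis ord p with
    | none => none
    | some (v, o) => dfsProds gd fuel v o rest
  termination_by (fuel, sizeOf prods, 1)

def dfsSyms (gd : PySem.Dict String (List (List String))) (fuel : Nat)
    (vis : PySem.Set String) (ord : List String) (syms : List String) :
    Option (PySem.Set String × List String) :=
  match syms with
  | [] => some (vis, ord)
  | s :: rest =>
    if pyStrIsupper s && !(vis.contains s) then
      match dfsA gd fuel vis ord s with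
      | none => none
      | some (v, o) => dfsSyms gd fuel v o rest
    else dfsSyms gd fuel vis ord rest
  termination_by (fuel, sizeOf syms, 0)
end

def sort_grammar (grammar : List (String × List (List String))) : List (String × List (List String)) :=
  match dfsA (PySem.Dict.ofList grammar) (grammar.length + 1) [] [] "S" with
  | none => []   -- Python raises KeyError here; excluded by Pre_
  | some (_, ord) => ord.map (fun k => (k, ((PySem.Dict.ofList grammar).get? k).getD []))

-- ===== PORT B =====
-- helpers the port's termination cites by name
def symsU (gd : PySem.Dict String (List (List String))) : Finset String :=
  (gd.items.map Prod.fst).toFinset ∪ ((gd.items.map Prod.snd).flatten.flatten).toFinset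

def bMeasure (gd : PySem.Dict String (List (List String))) (vis : PySem.Set String)
    (stack : List String) : Nat :=
  ((symsU gd ∪ stack.toFinset) \ (vis : List String).toFinset).card

theorem pair_of_get? {gd : PySem.Dict String (List (List String))} {n : String}
    {prods : List (List String)} (h : gd.get? n = some prods) : (n, prods) ∈ gd.items := by
  unfold PySem.Dict.get? at h
  cases hf : gd.items.find? (fun p => p.1 == n) with
  | none => simp [hf] at h
  | some pr =>
    have h1 := List.find?_some hf
    have h2 := List.mem_of_find?_eq_some hf
    simp [hf] at h
    have : pr.1 = n := by simpa using h1
    have : pr = (n, prods) := by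
      cases pr; simp_all
    simpa [this] using h2

theorem toFinset_add (vis : List String) (n : String) :
    (PySem.Set.add vis n).toFinset = insert n vis.toFinset := by
  unfold PySem.Set.add
  split
  · next hc =>
    have hmem : n ∈ vis := (PySem.Set.contains_iff vis n).mp hc
    simp [Finset.insert_eq_self.mpr (List.mem_toFinset.mpr hmem)]
  · ext x
    simp [or_comm]

theorem bMeasure_skip (gd : PySem.Dict String (List (List String))) (vis : PySem.Set String)
    (n : String) (rest : List String) : bMeasure gd vis rest ≤ bMeasure gd vis (n :: rest) := by
  apply Finset.card_le_card
  refine Finset.sdiff_subset_sdiff ?_ (Finset.Subset.refl _)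
  intro x hx
  simp only [Finset.mem_union, List.toFinset_cons, Finset.mem_insert] at hx ⊢
  tauto

theorem bMeasure_push {gd : PySem.Dict String (List (List String))} {n : String}
    {prods : List (List String)} (vis : PySem.Set String) (rest : List String)
    (h : gd.get? n = some prods) (hn : n ∉ vis) :
    bMeasure gd (PySem.Set.add vis n) (prods.flatten.filter pyStrIsupper ++ rest) <
      bMeasure gd vis (n :: rest) := by
  have hpair := pair_of_get? h
  have hC : ∀ c ∈ prods.flatten.filter pyStrIsupper, c ∈ symsU gd := by
    intro c hc
    have hc' : c ∈ prods.flatten := List.mem_of_mem_filter hc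
    rcases List.mem_flatten.mp hc' with ⟨prod, hprod, hcprod⟩
    unfold symsU
    apply Finset.mem_union_right
    apply List.mem_toFinset.mpr
    apply List.mem_flatten.mpr
    refine ⟨prod, ?_, hcprod⟩
    apply List.mem_flatten.mpr
    exact ⟨prods, List.mem_map.mpr ⟨(n, prods), hpair, rfl⟩, hprod⟩
  have hsub : (symsU gd ∪ (prods.flatten.filter pyStrIsupper ++ rest).toFinset) \
        (PySem.Set.add vis n : List String).toFinset ⊆
      (symsU gd ∪ (n :: rest).toFinset) \ (vis : List String).toFinset := by
    intro x hx
    rw [Finset.mem_sdiff] at hx ⊢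
    rcases hx with ⟨hx1, hx2⟩
    rw [toFinset_add, Finset.mem_insert] at hx2
    push_neg at hx2
    refine ⟨?_, hx2.2⟩
    simp only [Finset.mem_union, List.toFinset_append, List.toFinset_cons, Finset.mem_insert,
      List.mem_toFinset] at hx1 ⊢
    rcases hx1 with h1 | h1
    · exact Or.inl h1
    · rcases h1 with h1 | h1
      · exact Or.inl (by simpa using hC x h1)
      · exact Or.inr (Or.inr h1)
  have hmem : n ∈ (symsU gd ∪ (n :: rest).toFinset) \ (vis : List String).toFinset := by
    rw [Finset.mem_sdiff]
    exact ⟨by simp, by simpa using hn⟩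
  have hnot : n ∉ (symsU gd ∪ (prods.flatten.filter pyStrIsupper ++ rest).toFinset) \
      (PySem.Set.add vis n : List String).toFinset := by
    rw [Finset.mem_sdiff]
    rintro ⟨-, h2⟩
    exact h2 (by simp [toFinset_add])
  unfold bMeasure
  exact Finset.card_lt_card ((Finset.ssubset_iff_of_subset hsub).mpr ⟨n, hmem, hnot⟩)

-- Iterative DFS with an explicit stack (modelled head-first: Python pops from the end and
-- pushes the children reversed, which is `children ++ rest` here), marking on pop.
def dfsB (gd : PySem.Dict String (List (List String))) (vis : PySem.Set String)
    (ord : List String) (stack : List String) : Option (PySem.Set String × List String) :=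
  match stack with
  | [] => some (vis, ord)
  | n :: rest =>
    if hv : vis.contains n then dfsB gd vis ord rest
    else
      match hg : gd.get? n with
      | none => none        -- KeyError: grammar[node]
      | some prods =>
        dfsB gd (PySem.Set.add vis n) (ord ++ [n]) (prods.flatten.filter pyStrIsupper ++ rest)
  termination_by (bMeasure gd vis stack, stack.length)
  decreasing_by
  · have hle := bMeasure_skip gd vis n rest
    rcases lt_or_eq_of_le hle with h | h
    · exact Prod.Lex.left _ _ h
    · rw [h]; exact Prod.Lex.right _ (by simp)
  · have hn : n ∉ vis := by
      intro hmem
      exact hv ((PySem.Set.contains_iff vis n).mpr hmem)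
    exact Prod.Lex.left _ _ (bMeasure_push vis rest hg hn)

def sort_grammar_alt (grammar : List (String × List (List String))) : List (String × List (List String)) :=
  match dfsB (PySem.Dict.ofList grammar) [] [] ["S"] with
  | none => []   -- Python raises KeyError here; excluded by Pre_
  | some (_, ord) => ord.map (fun k => (k, ((PySem.Dict.ofList grammar).get? k).getD []))

-- ===== PRECONDITION & SPEC =====
-- The uppercase symbols one lookup of `n` yields (the DFS children of `n`); [] if `n` is no key.
def childrenOf (gd : PySem.Dict String (List (List String))) (n : String) : List String :=
  (((gd.get? n).getD []).flatten).filter pyStrIsupper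

-- One saturation step of plain graph reachability: add every child of every member.
def reachStep (gd : PySem.Dict String (List (List String))) (s : PySem.Set String) : PySem.Set String :=
  PySem.Set.update s (s.flatMap (childrenOf gd))

-- All symbols at distance ≤ k from "S" along children edges.
def reachFrom (gd : PySem.Dict String (List (List String))) : Nat → PySem.Set String
  | 0 => PySem.Set.ofList ["S"]
  | k + 1 => reachStep gd (reachFrom gd k)

-- Pre_ excludes EXACTLY the inputs on which Python A (and B) raises KeyError: it requires every
-- symbol reachable from "S" along uppercase-symbol edges to be a key of the dict. This is plain
-- graph reachability (a saturation closure, fixed after `grammar.length` steps since every step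
-- out of "S" goes through a distinct key), not a copy of either port's ordered DFS.
def Pre_sort_grammar (grammar : List (String × List (List String))) : Prop :=
  ∀ n ∈ reachFrom (PySem.Dict.ofList grammar) (grammar.length + 1),
    (PySem.Dict.ofList grammar).contains n = true
instance (grammar : List (String × List (List String))) : Decidable (Pre_sort_grammar grammar) := by
  unfold Pre_sort_grammar; infer_instance

def pvWitness_sort_grammar : (List (String × List (List String))) :=
  [("S", [["A", "b"], []]), ("A", [["a"]])]

def Spec_sort_grammar (grammar : List (String × List (List String))) (out : List (String × List (List String))) : Prop := out = sort_grammar_alt grammar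
instance (grammar : List (String × List (List String))) (out : List (String × List (List String))) : Decidable (Spec_sort_grammar grammar out) := by unfold Spec_sort_grammar; infer_instance

-- ===== CLAIM (what is proved, stated in full; the proofs are below) =====
def Claim_equal_sort_grammar : Prop := ∀ (grammar : List (String × List (List String))), Dom_sort_grammar grammar → Pre_sort_grammar grammar → Spec_sort_grammar grammar (sort_grammar grammar)

-- ===== LEMMAS AND PROOFS =====

-- A's recursion, sequenced over a worklist (the proof-side bridge between the two ports).
def procA (gd : PySem.Dict String (List (List String))) (fuel : Nat)
    (vis : PySem.Set String) (ord : List String) : List String → Option (PySem.Set String × List String)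
  | [] => some (vis, ord)
  | n :: ws =>
    match dfsA gd fuel vis ord n with
    | none => none
    | some (v, o) => procA gd fuel v o ws

theorem procA_append (gd : PySem.Dict String (List (List String))) (fuel : Nat) :
    ∀ (xs ys : List String) (vis : PySem.Set String) (ord : List String),
    procA gd fuel vis ord (xs ++ ys) =
      match procA gd fuel vis ord xs with
      | none => none
      | some p => procA gd fuel p.1 p.2 ys := by
  intro xs
  induction xs with
  | nil => intro ys vis ord; simp [procA]
  | cons n xs ih =>
    intro ys vis ord
    simp only [List.cons_append, procA]
    cases dfsA gd fuel vis ord n with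
    | none => rfl
    | some p => exact ih ys p.1 p.2

theorem dfsA_visited {gd : PySem.Dict String (List (List String))} {fuel : Nat}
    {vis : PySem.Set String} {ord : List String} {nt : String}
    (h : vis.contains nt = true) : dfsA gd fuel vis ord nt = some (vis, ord) := by
  rw [dfsA.eq_def, if_pos h]

theorem dfsSyms_eq (gd : PySem.Dict String (List (List String))) (fuel : Nat) :
    ∀ (syms : List String) (vis : PySem.Set String) (ord : List String),
    dfsSyms gd fuel vis ord syms = procA gd fuel vis ord (syms.filter pyStrIsupper) := by
  intro syms
  induction syms with
  | nil => intro vis ord; simp [dfsSyms, procA]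
  | cons s rest ih =>
    intro vis ord
    rw [dfsSyms.eq_def]
    dsimp only
    by_cases hup : pyStrIsupper s = true
    · by_cases hv : vis.contains s = true
      · have hcond : ¬((pyStrIsupper s && !vis.contains s) = true) := by
          simp only [hv, Bool.not_true, Bool.and_false]; exact Bool.false_ne_true
        rw [if_neg hcond, List.filter_cons, if_pos hup]
        simp only [procA, dfsA_visited hv]
        exact ih vis ord
      · have hv' : vis.contains s = false := by simpa using hv
        have hcond : (pyStrIsupper s && !vis.contains s) = true := by rw [hup, hv']; rfl
        rw [if_pos hcond, List.filter_cons, if_pos hup]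
        simp only [procA]
        cases dfsA gd fuel vis ord s with
        | none => rfl
        | some p =>
          obtain ⟨v, o⟩ := p
          exact ih v o
    · have hup' : pyStrIsupper s = false := by simpa using hup
      have hcond : ¬((pyStrIsupper s && !vis.contains s) = true) := by simp [hup']
      rw [if_neg hcond, List.filter_cons, if_neg (by simp [hup'])]
      exact ih vis ord

theorem dfsProds_eq (gd : PySem.Dict String (List (List String))) (fuel : Nat) :
    ∀ (prods : List (List String)) (vis : PySem.Set String) (ord : List String),
    dfsProds gd fuel vis ord prods = procA gd fuel vis ord (prods.flatten.filter pyStrIsupper) := by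
  intro prods
  induction prods with
  | nil => intro vis ord; simp [dfsProds, procA]
  | cons p rest ih =>
    intro vis ord
    rw [dfsProds.eq_def]
    dsimp only
    rw [show (p :: rest).flatten = p ++ rest.flatten from rfl, List.filter_append, procA_append]
    rw [dfsSyms_eq gd fuel p vis ord]
    cases procA gd fuel vis ord (p.filter pyStrIsupper) with
    | none => rfl
    | some q => exact ih q.1 q.2

theorem dfsB_append (gd : PySem.Dict String (List (List String))) :
    ∀ (vis : PySem.Set String) (ord : List String) (xs ys : List String),
    dfsB gd vis ord (xs ++ ys) =
      match dfsB gd vis ord xs with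
      | none => none
      | some p => dfsB gd p.1 p.2 ys := by
  intro vis ord xs
  induction vis, ord, xs using dfsB.induct gd with
  | case1 vis ord => intro ys; simp [dfsB]
  | case2 vis ord n rest hv ih =>
    intro ys
    simp only [List.cons_append]
    rw [dfsB, dif_pos hv, ih]
    conv_rhs => rw [dfsB, dif_pos hv]
  | case3 vis ord n rest hv hg =>
    intro ys
    simp only [List.cons_append]
    rw [dfsB, dif_neg hv]
    conv_rhs => rw [dfsB, dif_neg hv]
    split <;> simp_all
  | case4 vis ord n rest hv prods hg ih =>
    intro ys
    simp only [List.cons_append]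
    rw [dfsB, dif_neg hv]
    conv_rhs => rw [dfsB, dif_neg hv]
    split
    · simp_all
    · next prods' heq =>
      have hpp : prods' = prods := Option.some.inj (heq.symm.trans hg)
      subst hpp
      rw [← List.append_assoc]
      exact ih ys

theorem dfsB_mono (gd : PySem.Dict String (List (List String))) :
    ∀ (vis : PySem.Set String) (ord : List String) (st : List String),
    ∀ p, dfsB gd vis ord st = some p → (vis : List String).toFinset ⊆ p.1.toFinset := by
  intro vis ord st
  induction vis, ord, st using dfsB.induct gd with
  | case1 vis ord =>
    intro p hp
    rw [dfsB] at hp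
    cases hp
    simp
  | case2 vis ord n rest hv ih =>
    intro p hp
    rw [dfsB, dif_pos hv] at hp
    exact ih p hp
  | case3 vis ord n rest hv hg =>
    intro p hp
    rw [dfsB, dif_neg hv] at hp
    split at hp <;> simp_all
  | case4 vis ord n rest hv prods hg ih =>
    intro p hp
    rw [dfsB, dif_neg hv] at hp
    split at hp
    · simp_all
    · next prods' heq =>
      have hpp : prods' = prods := Option.some.inj (heq.symm.trans hg)
      subst hpp
      refine Finset.Subset.trans ?_ (ih p hp)
      rw [toFinset_add]
      exact Finset.subset_insert _ _

theorem procA_eq_dfsB (gd : PySem.Dict String (List (List String))) :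
    ∀ (N : Nat) (vis : PySem.Set String) (ord : List String) (ws : List String) (fuel : Nat),
    ((gd.items.map Prod.fst).toFinset \ (vis : List String).toFinset).card ≤ N →
    ((gd.items.map Prod.fst).toFinset \ (vis : List String).toFinset).card < fuel →
    procA gd fuel vis ord ws = dfsB gd vis ord ws := by
  intro N
  induction N using Nat.strong_induction_on with
  | _ N ih =>
    intro vis ord ws fuel
    induction ws generalizing vis ord fuel with
    | nil => intro _ _; simp [procA, dfsB]
    | cons n ws ihw =>
      intro hN hf
      by_cases hv : vis.contains n = true
      · simp only [procA, dfsA_visited hv]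
        rw [dfsB, dif_pos hv]
        exact ihw vis ord fuel hN hf
      · have hv' : vis.contains n = false := by simpa using hv
        have hnv : n ∉ vis := fun hmem => hv ((PySem.Set.contains_iff vis n).mpr hmem)
        cases fuel with
        | zero => omega
        | succ f =>
          cases hg : gd.get? n with
          | none =>
            have hA : dfsA gd (f + 1) vis ord n = none := by
              rw [dfsA.eq_def]
              simp [hg, hnv]
            simp only [procA, hA]
            rw [dfsB, dif_neg hv]
            split
            · rfl
            · next prods' heq => rw [hg] at heq; cases heq
          | some prods =>
            have hnK : n ∈ (gd.items.map Prod.fst).toFinset :=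
              List.mem_toFinset.mpr (List.mem_map.mpr ⟨(n, prods), pair_of_get? hg, rfl⟩)
            have hcard :
                ((gd.items.map Prod.fst).toFinset \ (PySem.Set.add vis n : List String).toFinset).card <
                ((gd.items.map Prod.fst).toFinset \ (vis : List String).toFinset).card := by
              rw [toFinset_add, Finset.sdiff_insert]
              exact Finset.card_erase_lt_of_mem
                (Finset.mem_sdiff.mpr ⟨hnK, by simpa using hnv⟩)
            have h1 : dfsA gd (f + 1) vis ord n =
                dfsB gd (PySem.Set.add vis n) (ord ++ [n]) (prods.flatten.filter pyStrIsupper) := by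
              rw [dfsA.eq_def]
              simp only [hv', hg, Bool.false_eq_true, if_false]
              rw [dfsProds_eq]
              exact ih (((gd.items.map Prod.fst).toFinset \ (PySem.Set.add vis n : List String).toFinset).card) (by omega) _ _ _ f le_rfl (by omega)
            rw [dfsB, dif_neg hv]
            split
            · next heq => rw [hg] at heq; cases heq
            · next prods' heq =>
              have hpp : prods = prods' := Option.some.inj (hg.symm.trans heq)
              subst hpp
              rw [dfsB_append]
              simp only [procA, h1]
              cases hres : dfsB gd (PySem.Set.add vis n) (ord ++ [n]) (prods.flatten.filter pyStrIsupper) with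
              | none => simp only [hres]
              | some p =>
                simp only [hres]
                have hmono := dfsB_mono gd _ _ _ p hres
                have hc2 :
                    ((gd.items.map Prod.fst).toFinset \ (p.1 : List String).toFinset).card ≤
                    ((gd.items.map Prod.fst).toFinset \ (PySem.Set.add vis n : List String).toFinset).card :=
                  Finset.card_le_card (Finset.sdiff_subset_sdiff (Finset.Subset.refl _) hmono)
                exact ih (((gd.items.map Prod.fst).toFinset \ (p.1 : List String).toFinset).card) (by omega) p.1 p.2 ws (f + 1) le_rfl (by omega)

theorem insert_items_len {κ ν : Type} [BEq κ] (d : PySem.Dict κ ν) (k : κ) (v : ν) :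
    (d.insert k v).items.length ≤ d.items.length + 1 := by
  unfold PySem.Dict.insert
  split <;> simp

theorem update_items_len {κ ν : Type} [BEq κ] :
    ∀ (ps : List (κ × ν)) (d : PySem.Dict κ ν),
    (d.update ps).items.length ≤ d.items.length + ps.length := by
  intro ps
  induction ps with
  | nil => intro d; simp [PySem.Dict.update]
  | cons p ps ih =>
    intro d
    have h1 := ih (d.insert p.1 p.2)
    have h2 := insert_items_len d p.1 p.2
    simp only [PySem.Dict.update, List.foldl_cons, List.length_cons] at h1 ⊢
    omega

theorem ofList_items_len (g : List (String × List (List String))) :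
    (PySem.Dict.ofList g).items.length ≤ g.length := by
  have := update_items_len g (PySem.Dict.empty (κ := String) (ν := List (List String)))
  simpa [PySem.Dict.ofList, PySem.Dict.empty] using this

theorem dfsA_eq_dfsB (gd : PySem.Dict String (List (List String))) (fuel : Nat)
    (hf : ((gd.items.map Prod.fst).toFinset).card < fuel) :
    dfsA gd fuel [] [] "S" = dfsB gd [] [] ["S"] := by
  have h := procA_eq_dfsB gd ((gd.items.map Prod.fst).toFinset.card) [] [] ["S"] fuel
    (by simp) (by simpa using hf)
  have hL : procA gd fuel [] [] ["S"] = dfsA gd fuel [] [] "S" := by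
    simp only [procA]
    cases dfsA gd fuel [] [] "S" with
    | none => rfl
    | some p => rfl
  rw [← hL, h]

-- ===== VERDICT (by name: the statement is the Claim_ definition above) =====
theorem sort_grammar_spec : Claim_equal_sort_grammar := by
  unfold Claim_equal_sort_grammar
  intro grammar _hdom _hpre
  unfold Spec_sort_grammar sort_grammar sort_grammar_alt
  have hcard : ((PySem.Dict.ofList grammar).items.map Prod.fst).toFinset.card < grammar.length + 1 := by
    have h1 := List.toFinset_card_le ((PySem.Dict.ofList grammar).items.map Prod.fst)
    have h2 := ofList_items_len grammar
    simp only [List.length_map] at h1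
    omega
  rw [dfsA_eq_dfsB _ _ hcard]
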